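-- pv_equiv track=rewrite | github.com/bioinfo-assomagi/pipelinegpu | utils.py | group_samples
-- ===== SOURCE A (Python) =====
-- def group_samples(fastq_files):
--
--     sample_dict = {}
--
--     for fastq_file in fastq_files:
--         sample_name = fastq_file.split("/")[-1].split("_")[0]
--
--         if sample_name not in sample_dict:
--             sample_dict[sample_name] = {
--                 "name": str(sample_name),
--                 "forward": None,
--                 "reverse": None,
--             }
--
--         if "R1" in fastq_file:
--             sample_dict[sample_name]["forward"] = fastq_file
--         elif "R2" in fastq_file:
--             sample_dict[sample_name]["reverse"] = fastq_file
--
--     return sample_dict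
-- ===== SOURCE B (Python) =====
-- def _record(name, files):
--     record = {"name": str(name), "forward": None, "reverse": None}
--     for f in files:
--         if "R1" in f:
--             record["forward"] = f
--         elif "R2" in f:
--             record["reverse"] = f
--     return record
--
--
-- def group_samples(fastq_files):
--     groups = {}
--     for f in fastq_files:
--         groups.setdefault(f.split("/")[-1].split("_")[0], []).append(f)
--     return {name: _record(name, files) for name, files in groups.items()}
-- ===== Notes on version B (the rewrite author's own statement) =====
-- stated objective: alternative
-- what changed: A creates and overwrites each sample's record inside one interleaved loop over the files; B first groups the files per sample name into an ordered dict and then builds every sample's record independently from its own file list.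
import Mathlib
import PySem

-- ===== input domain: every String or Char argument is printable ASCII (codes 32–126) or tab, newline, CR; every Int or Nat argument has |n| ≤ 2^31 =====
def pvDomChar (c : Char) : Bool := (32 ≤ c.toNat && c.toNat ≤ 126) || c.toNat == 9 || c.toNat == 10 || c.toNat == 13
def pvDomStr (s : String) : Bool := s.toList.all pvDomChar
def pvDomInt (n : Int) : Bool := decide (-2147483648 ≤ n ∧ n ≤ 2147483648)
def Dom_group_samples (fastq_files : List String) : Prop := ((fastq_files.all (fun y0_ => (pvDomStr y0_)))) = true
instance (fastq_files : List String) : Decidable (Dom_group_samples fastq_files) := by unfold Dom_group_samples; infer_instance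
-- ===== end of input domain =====

-- B replaces A's single interleaved create/overwrite loop by a group-then-build decomposition
-- (first group the files per sample, then build each sample's record from its own files); objective: alternative.

-- shared helper: fastq_file.split("/")[-1].split("_")[0]
-- (split by a NONEMPTY separator never yields an empty list, so the `.getD` defaults
--  after `pyGet?` at indices -1 and 0 are never taken; Python never raises here)
def pvSampleName (f : String) : String :=
  (PySem.List.pyGet?
    ((PySem.Str.split?
      ((PySem.List.pyGet? ((PySem.Str.split? f "/").getD []) (-1)).getD "") "_").getD []) 0).getD ""

-- ===== PORT A =====
-- the initial record {"name": str(n), "forward": None, "reverse": None}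
def pvInitRec (n : String) : PySem.Dict String (Option String) :=
  PySem.Dict.ofList [("name", some n), ("forward", none), ("reverse", none)]

-- the body of A's for-loop (sample_dict[name]["forward"] = f is an in-place modify of the
-- existing key; the `PySem.Dict.empty` default of `modify` is never taken: the key is present)
def pvStepA (d : PySem.Dict String (PySem.Dict String (Option String))) (f : String) :
    PySem.Dict String (PySem.Dict String (Option String)) :=
  let name := pvSampleName f
  let d1 := if d.contains name then d else d.insert name (pvInitRec name)
  if PySem.Str.isIn "R1" f then
    d1.modify name PySem.Dict.empty (fun r => r.insert "forward" (some f))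
  else if PySem.Str.isIn "R2" f then
    d1.modify name PySem.Dict.empty (fun r => r.insert "reverse" (some f))
  else d1

def group_samples (fastq_files : List String) : List (String × List (String × Option String)) :=
  (fastq_files.foldl pvStepA PySem.Dict.empty).items.map (fun p => (p.1, p.2.items))

-- ===== PORT B =====
-- the body of _record's for-loop
def pvStepR (r : PySem.Dict String (Option String)) (f : String) : PySem.Dict String (Option String) :=
  if PySem.Str.isIn "R1" f then r.insert "forward" (some f)
  else if PySem.Str.isIn "R2" f then r.insert "reverse" (some f)
  else r

-- _record(name, files)
def pvRecord (n : String) (fs : List String) : PySem.Dict String (Option String) :=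
  fs.foldl pvStepR (pvInitRec n)

-- groups.setdefault(name, []).append(f)  =  modify name [] (· ++ [f])
def pvStepG (g : PySem.Dict String (List String)) (f : String) : PySem.Dict String (List String) :=
  g.modify (pvSampleName f) [] (fun l => l ++ [f])

def group_samples_alt (fastq_files : List String) : List (String × List (String × Option String)) :=
  let groups := fastq_files.foldl pvStepG PySem.Dict.empty
  -- dict comprehension over groups.items(): keys are distinct, so it is a map
  groups.items.map (fun p => (p.1, (pvRecord p.1 p.2).items))

-- ===== PRECONDITION & SPEC =====
def Spec_group_samples (fastq_files : List String) (out : List (String × List (String × Option String))) : Prop := out = group_samples_alt fastq_files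
instance (fastq_files : List String) (out : List (String × List (String × Option String))) : Decidable (Spec_group_samples fastq_files out) := by unfold Spec_group_samples; infer_instance

-- ===== CLAIM (what is proved, stated in full; the proofs are below) =====
def Claim_equal_group_samples : Prop := ∀ (fastq_files : List String), Dom_group_samples fastq_files → Spec_group_samples fastq_files (group_samples fastq_files)

-- ===== LEMMAS AND PROOFS =====

-- the entry (name, fs) of the grouping dict corresponds to the entry (name, record) of A's dict
def pvFm (p : String × List String) : String × PySem.Dict String (Option String) :=
  (p.1, pvRecord p.1 p.2)

theorem pvNodupKeysG (files : List String) (g : PySem.Dict String (List String))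
    (h : g.keys.Nodup) : (files.foldl pvStepG g).keys.Nodup := by
  induction files generalizing g with
  | nil => simpa using h
  | cons f fs ih =>
    simp only [List.foldl_cons]
    exact ih _ (by unfold pvStepG PySem.Dict.modify; exact PySem.Dict.nodup_keys_insert _ _ _ h)

theorem pvFindMap (n : String) (l : List (String × List String)) :
    List.find? (fun p => p.1 == n) (l.map pvFm)
      = Option.map pvFm (List.find? (fun p => p.1 == n) l) := by
  induction l with
  | nil => simp
  | cons p l ih =>
    by_cases h : p.1 = n
    · simp [pvFm, h]
    · simp only [List.map_cons, List.find?_cons]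
      have hb : (p.1 == n) = false := by simp [h]
      simp [pvFm, hb, ih]

theorem pvGetMap (G : PySem.Dict String (List String)) (n : String) :
    (PySem.Dict.mk (G.items.map pvFm)).get? n = Option.map (pvRecord n) (G.get? n) := by
  simp only [PySem.Dict.get?, pvFindMap]
  cases hf : List.find? (fun p => p.1 == n) G.items with
  | none => simp
  | some p =>
    have : p.1 = n := by simpa using List.find?_some hf
    simp [pvFm, this]

theorem pvContainsMap (G : PySem.Dict String (List String)) (n : String) :
    (PySem.Dict.mk (G.items.map pvFm)).contains n = G.contains n := by
  simp only [PySem.Dict.contains, List.any_map]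
  rfl

-- overwriting a field of the record just appended under a fresh key n
theorem pvUpd (D : PySem.Dict String (PySem.Dict String (Option String))) (n : String)
    (hDc : D.contains n = false) (r : PySem.Dict String (Option String))
    (key : String) (v : Option String) :
    ((D.insert n r).modify n PySem.Dict.empty (fun rec => rec.insert key v)).items
      = D.items ++ [(n, r.insert key v)] := by
  have hkeyne : ∀ p ∈ D.items, (p.1 == n) = false := by
    intro p hp
    have hany : D.items.any (fun p => p.1 == n) = false := hDc
    rw [List.any_eq_false] at hany
    simpa using hany p hp
  rw [PySem.Dict.modify,
    PySem.Dict.items_insert_of_contains _ _ (PySem.Dict.contains_insert_self _ _ _),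
    PySem.Dict.getD_eq_get?_getD, PySem.Dict.get?_insert_self,
    PySem.Dict.items_insert_of_not_contains _ _ hDc, List.map_append]
  congr 1
  · conv_rhs => rw [← List.map_id D.items]
    apply List.map_congr_left
    intro p hp
    simp [hkeyne p hp]
  · simp

set_option maxHeartbeats 1000000 in
theorem pvMain (files : List String) :
    files.foldl pvStepA PySem.Dict.empty
      = PySem.Dict.mk ((files.foldl pvStepG PySem.Dict.empty).items.map pvFm) := by
  induction files using List.reverseRecOn with
  | nil => rfl
  | append_singleton files f ih =>
    simp only [List.foldl_append, List.foldl_cons, List.foldl_nil, ih]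
    set G := files.foldl pvStepG PySem.Dict.empty with hG
    have hnodup : G.keys.Nodup := pvNodupKeysG files _ PySem.Dict.nodup_keys_empty
    set n := pvSampleName f with hn
    have hstepG : pvStepG G f = G.insert n (G.getD n [] ++ [f]) := rfl
    by_cases hc : G.contains n = true
    · -- existing sample
      obtain ⟨old, hold⟩ : ∃ old, G.get? n = some old := by
        have := PySem.Dict.contains_eq_isSome_get? G n
        rw [hc] at this
        exact Option.isSome_iff_exists.mp this.symm
      have hgetD : G.getD n [] = old := by rw [PySem.Dict.getD_eq_get?_getD, hold]; rfl
      have hDc : (PySem.Dict.mk (G.items.map pvFm)).contains n = true := by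
        rw [pvContainsMap]; exact hc
      have hDget : (PySem.Dict.mk (G.items.map pvFm)).getD n PySem.Dict.empty = pvRecord n old := by
        rw [PySem.Dict.getD_eq_get?_getD, pvGetMap, hold]; rfl
      have hR : (pvStepG G f).items.map pvFm
          = G.items.map (fun p => if p.1 == n then (n, pvRecord n (old ++ [f])) else pvFm p) := by
        rw [hstepG, hgetD, PySem.Dict.items_insert_of_contains _ _ hc, List.map_map]
        apply List.map_congr_left
        intro p _
        by_cases h : p.1 = n <;> simp [pvFm, h]
      have hrecsnoc : pvRecord n (old ++ [f]) = pvStepR (pvRecord n old) f := by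
        simp [pvRecord, List.foldl_append]
      have hmemval : ∀ p ∈ G.items, p.1 = n → p.2 = old := by
        intro p hp hpn
        have := PySem.Dict.get?_of_mem_items G (k := p.1) (v := p.2) (by simpa using hp) hnodup
        rw [hpn, hold] at this
        exact (Option.some_inj.mp this).symm
      unfold pvStepA
      rw [← hn]
      simp only [hDc, if_true]
      by_cases h1 : PySem.Str.isIn "R1" f = true
      · have hv : ((PySem.Dict.mk (G.items.map pvFm)).getD n PySem.Dict.empty).insert
              "forward" (some f) = pvRecord n (old ++ [f]) := by
          rw [hDget, hrecsnoc]; unfold pvStepR; rw [if_pos h1]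
        rw [if_pos h1, PySem.Dict.modify, hv]
        apply PySem.Dict.ext
        rw [PySem.Dict.items_insert_of_contains _ _ hDc]
        show List.map _ (List.map pvFm G.items) = _
        rw [List.map_map, hR]
        apply List.map_congr_left
        intro p _
        by_cases h : p.1 = n <;> simp [pvFm, h]
      · by_cases h2 : PySem.Str.isIn "R2" f = true
        · have hv : ((PySem.Dict.mk (G.items.map pvFm)).getD n PySem.Dict.empty).insert
                "reverse" (some f) = pvRecord n (old ++ [f]) := by
            rw [hDget, hrecsnoc]; unfold pvStepR; rw [if_neg h1, if_pos h2]
          rw [if_neg h1, if_pos h2, PySem.Dict.modify, hv]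
          apply PySem.Dict.ext
          rw [PySem.Dict.items_insert_of_contains _ _ hDc]
          show List.map _ (List.map pvFm G.items) = _
          rw [List.map_map, hR]
          apply List.map_congr_left
          intro p _
          by_cases h : p.1 = n <;> simp [pvFm, h]
        · have hnoop : pvRecord n (old ++ [f]) = pvRecord n old := by
            rw [hrecsnoc]; unfold pvStepR; rw [if_neg h1, if_neg h2]
          rw [if_neg h1, if_neg h2]
          apply PySem.Dict.ext
          show List.map pvFm G.items = _
          rw [hR]
          apply List.map_congr_left
          intro p hp
          by_cases h : p.1 = n
          · have hpv := hmemval p hp h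
            simp [pvFm, h, hpv, hnoop]
          · simp [h]
    · -- new sample
      have hc' : G.contains n = false := by simpa using hc
      have hgetD : G.getD n [] = [] := PySem.Dict.getD_of_not_contains G [] hc'
      have hR : (pvStepG G f).items.map pvFm
          = G.items.map pvFm ++ [(n, pvRecord n [f])] := by
        rw [hstepG, hgetD, PySem.Dict.items_insert_of_not_contains _ _ hc']
        simp [pvFm]
      have hDc : (PySem.Dict.mk (G.items.map pvFm)).contains n = false := by
        rw [pvContainsMap]; exact hc'
      have hins : ((PySem.Dict.mk (G.items.map pvFm)).insert n (pvInitRec n)).items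
          = G.items.map pvFm ++ [(n, pvInitRec n)] :=
        PySem.Dict.items_insert_of_not_contains _ _ hDc
      unfold pvStepA
      rw [← hn]
      simp only [hDc, Bool.false_eq_true, if_false]
      by_cases h1 : PySem.Str.isIn "R1" f = true
      · have hone : (pvInitRec n).insert "forward" (some f) = pvRecord n [f] := by
          show _ = pvStepR (pvInitRec n) f
          unfold pvStepR; rw [if_pos h1]
        rw [if_pos h1]
        apply PySem.Dict.ext
        rw [pvUpd _ _ hDc, hone]
        show _ = List.map pvFm (pvStepG G f).items
        rw [hR]
      · by_cases h2 : PySem.Str.isIn "R2" f = true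
        · have hone : (pvInitRec n).insert "reverse" (some f) = pvRecord n [f] := by
            show _ = pvStepR (pvInitRec n) f
            unfold pvStepR; rw [if_neg h1, if_pos h2]
          rw [if_neg h1, if_pos h2]
          apply PySem.Dict.ext
          rw [pvUpd _ _ hDc, hone]
          show _ = List.map pvFm (pvStepG G f).items
          rw [hR]
        · have hone : pvInitRec n = pvRecord n [f] := by
            show _ = pvStepR (pvInitRec n) f
            unfold pvStepR; rw [if_neg h1, if_neg h2]
          rw [if_neg h1, if_neg h2]
          apply PySem.Dict.ext
          rw [hins, hone]
          show _ = List.map pvFm (pvStepG G f).items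
          rw [hR]

-- ===== VERDICT (by name: the statement is the Claim_ definition above) =====
theorem group_samples_spec : Claim_equal_group_samples := by
  intro files _
  unfold Spec_group_samples group_samples group_samples_alt
  rw [pvMain]
  show List.map _ (List.map pvFm _) = _
  rw [List.map_map]
  rfl
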